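-- pv_equiv track=rewrite | github.com/TAE-SEOP/Algorithm | 파이썬/힙_더 맵게(스코빌지수).py | solution
-- ===== SOURCE A (Python) =====
-- def solution(scoville, K):
--     answer = 0
--
--     while len(scoville) > 1:
--         if min(scoville) < K:
--             answer +=1
--             first = scoville.pop(scoville.index(min(scoville)))
--             second = scoville.pop(scoville.index(min(scoville)))
--             scoville.append(first + second*2)
--         else:
--             scoville.pop()
--     if scoville[0] < K:
--         answer = -1
--     return answer
-- ===== SOURCE B (Python) =====
-- def _insert(xs, c):
--     # splice c before the first element that is >= c (xs is sorted ascending)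
--     for i, x in enumerate(xs):
--         if not (x < c):
--             return xs[:i] + [c] + xs[i:]
--     return xs + [c]
--
--
-- def solution(scoville, K):
--     s = sorted(scoville)
--     answer = 0
--     while len(s) > 1 and s[0] < K:
--         s = _insert(s[2:], s[0] + s[1] * 2)
--         answer += 1
--     return answer if s[0] >= K else -1
-- ===== Notes on version B (the rewrite author's own statement) =====
-- stated objective: faster
-- what changed: A rescans the whole list with min()/index()/pop() several times per mix; B sorts once and keeps the list sorted, taking the two smallest from the front and splicing the combined value back in with a single insertion pass (A also empties the input list in place; B leaves it untouched).
import Mathlib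
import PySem

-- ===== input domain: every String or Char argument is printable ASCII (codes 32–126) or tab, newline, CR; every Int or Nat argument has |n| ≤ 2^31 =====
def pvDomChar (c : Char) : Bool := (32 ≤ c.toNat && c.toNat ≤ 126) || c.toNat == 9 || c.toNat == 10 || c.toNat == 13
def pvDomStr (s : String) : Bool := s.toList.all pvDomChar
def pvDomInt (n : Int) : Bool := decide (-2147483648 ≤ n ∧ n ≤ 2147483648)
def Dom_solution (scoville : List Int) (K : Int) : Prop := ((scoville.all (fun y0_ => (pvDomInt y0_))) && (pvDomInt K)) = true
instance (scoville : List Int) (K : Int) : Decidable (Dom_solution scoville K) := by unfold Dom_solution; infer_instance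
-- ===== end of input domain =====

-- B sorts once and maintains a sorted list (two smallest at the front, one insertion pass per mix)
-- instead of A's repeated min()/index()/pop() scans; A empties its argument in place, B does not
-- mutate it — the equivalence proved here is about the RETURN value.

-- ===== PORT A =====
-- after the while loop: 'if scoville[0] < K: answer = -1; return answer'
-- (the 'none' branch, scoville empty, is Python's IndexError — excluded by Pre_)
def solutionFin (sc : List Int) (K ans : Int) : Int :=
  match PySem.List.pyGet? sc 0 with
  | none => -1
  | some v => if v < K then -1 else ans

-- the while loop; each iteration shortens the list by 1, so fuel = initial length suffices.
-- inner 'none' branches are unreachable (min/index/pop on a list of length ≥ 2).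
def solutionLoop (fuel : Nat) (sc : List Int) (K ans : Int) : Int :=
  match fuel with
  | 0 => solutionFin sc K ans
  | fuel + 1 =>
    if 1 < sc.length then
      match PySem.List.min? sc (fun x => x) with
      | none => -1
      | some m =>
        if m < K then
          match PySem.List.index? sc m with
          | none => -1
          | some i =>
            match PySem.List.pop? sc (i : Int) with
            | none => -1
            | some (first, sc1) =>
              match PySem.List.min? sc1 (fun x => x) with
              | none => -1
              | some m2 =>
                match PySem.List.index? sc1 m2 with
                | none => -1
                | some j =>
                  match PySem.List.pop? sc1 (j : Int) with
                  | none => -1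
                  | some (second, sc2) =>
                    solutionLoop fuel (sc2 ++ [first + second * 2]) K (ans + 1)
        else
          match PySem.List.pop? sc (-1) with
          | none => -1
          | some (_, sc') => solutionLoop fuel sc' K ans
    else solutionFin sc K ans

def solution (scoville : List Int) (K : Int) : Int :=
  solutionLoop scoville.length scoville K 0

-- ===== PORT B =====
-- _insert: splice c before the first element ≥ c (linear scan over the sorted list)
def insertSorted (xs : List Int) (c : Int) : List Int :=
  match xs with
  | [] => [c]
  | x :: t => if x < c then x :: insertSorted t c else c :: x :: t

-- 'return answer if s[0] >= K else -1' ('none' = IndexError on empty input, excluded by Pre_)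
def altFin (s : List Int) (K ans : Int) : Int :=
  match PySem.List.pyGet? s 0 with
  | none => -1
  | some v => if K ≤ v then ans else -1

-- 'while len(s) > 1 and s[0] < K'; each iteration shortens s by 1
def altLoop (fuel : Nat) (s : List Int) (K ans : Int) : Int :=
  match fuel with
  | 0 => altFin s K ans
  | fuel + 1 =>
    if 1 < s.length ∧ PySem.List.pyGetD s 0 0 < K then
      altLoop fuel
        (insertSorted (PySem.List.slice s (some 2) none)
          (PySem.List.pyGetD s 0 0 + PySem.List.pyGetD s 1 0 * 2)) K (ans + 1)
    else altFin s K ans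

def solution_alt (scoville : List Int) (K : Int) : Int :=
  altLoop (PySem.List.sorted scoville (fun x => x) false).length
    (PySem.List.sorted scoville (fun x => x) false) K 0

-- ===== PRECONDITION & SPEC =====
-- Pre_ excludes only the empty list, on which A raises IndexError (scoville[0]).
def Pre_solution (scoville : List Int) (K : Int) : Prop := scoville ≠ []
instance (scoville : List Int) (K : Int) : Decidable (Pre_solution scoville K) := by
  unfold Pre_solution; infer_instance

def pvWitness_solution : List Int × Int := ([1, 2, 3, 9, 10, 12], 7)

def Spec_solution (scoville : List Int) (K : Int) (out : Int) : Prop := out = solution_alt scoville K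
instance (scoville : List Int) (K : Int) (out : Int) : Decidable (Spec_solution scoville K out) := by
  unfold Spec_solution; infer_instance

-- ===== CLAIM (what is proved, stated in full; the proofs are below) =====
def Claim_equal_solution : Prop := ∀ (scoville : List Int) (K : Int), Dom_solution scoville K → Pre_solution scoville K → Spec_solution scoville K (solution scoville K)

-- ===== LEMMAS AND PROOFS =====

lemma insertSorted_perm (xs : List Int) (c : Int) : (insertSorted xs c).Perm (c :: xs) := by
  induction xs with
  | nil => simp [insertSorted]
  | cons x t ih =>
    simp only [insertSorted]
    split
    · exact ((ih.cons x).trans (List.Perm.swap c x t))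
    · exact List.Perm.refl _

lemma insertSorted_pairwise (xs : List Int) (c : Int) (h : xs.Pairwise (· ≤ ·)) :
    (insertSorted xs c).Pairwise (· ≤ ·) := by
  induction xs with
  | nil => simp [insertSorted]
  | cons x t ih =>
    rcases List.pairwise_cons.mp h with ⟨hx, ht⟩
    simp only [insertSorted]
    split
    · rename_i hlt
      refine List.pairwise_cons.mpr ⟨?_, ih ht⟩
      intro y hy
      rcases List.mem_cons.mp ((insertSorted_perm t c).mem_iff.mp hy) with rfl | hyt
      · omega
      · exact hx y hyt
    · rename_i hnlt
      refine List.pairwise_cons.mpr ⟨?_, h⟩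
      intro y hy
      rcases List.mem_cons.mp hy with rfl | hyt
      · omega
      · exact le_trans (by omega) (hx y hyt)

-- once every element is ≥ K, A's loop just pops and finally returns ans unchanged
lemma solutionLoop_ge (n : Nat) : ∀ (sc : List Int) (K ans : Int), sc ≠ [] →
    (∀ y ∈ sc, K ≤ y) → solutionLoop n sc K ans = ans := by
  induction n with
  | zero =>
    intro sc K ans hne hge
    match sc, hne with
    | x :: t, _ =>
      simp only [solutionLoop, solutionFin, PySem.List.pyGet?, PySem.List.pyIdx?]
      norm_num
      have := hge x (by simp)
      omega
  | succ n ih =>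
    intro sc K ans hne hge
    by_cases hl : 1 < sc.length
    · obtain ⟨m, hm⟩ : ∃ m, PySem.List.min? sc (fun x => x) = some m := by
        cases h : PySem.List.min? sc (fun x => x) with
        | none => exact absurd ((PySem.List.min?_eq_none_iff _ _).mp h) hne
        | some m => exact ⟨m, rfl⟩
      have hmK : ¬ m < K := by
        have := hge m (PySem.List.min?_mem hm); omega
      have hpop : PySem.List.pop? sc (-1) = some (sc.getLast hne, sc.dropLast) := by
        conv_lhs => rw [← List.dropLast_append_getLast hne]
        exact PySem.List.pop?_last _ _
      simp only [solutionLoop, if_pos hl, hm, if_neg hmK, hpop]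
      have hdl : sc.dropLast ≠ [] := by
        intro h
        have := sc.length_dropLast
        rw [h] at this; simp at this; omega
      exact ih sc.dropLast K ans hdl (fun y hy => hge y (List.dropLast_subset _ hy))
    · match sc, hne with
      | x :: t, _ =>
        simp only [solutionLoop, if_neg hl, solutionFin, PySem.List.pyGet?, PySem.List.pyIdx?]
        norm_num
        have := hge x (by simp)
        omega

-- from a sorted permutation, min? on sc finds exactly the sorted head
lemma min_sorted_perm (sc : List Int) (m : Int) (t : List Int)
    (hperm : sc.Perm (m :: t)) (hpw : (m :: t).Pairwise (· ≤ ·)) :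
    PySem.List.min? sc (fun x => x) = some m := by
  have hne : sc ≠ [] := by
    intro h; subst h
    have := hperm.length_eq; simp at this
  obtain ⟨m', hm'⟩ : ∃ m', PySem.List.min? sc (fun x => x) = some m' := by
    cases h : PySem.List.min? sc (fun x => x) with
    | none => exact absurd ((PySem.List.min?_eq_none_iff _ _).mp h) hne
    | some m' => exact ⟨m', rfl⟩
  have h1 : m' ≤ m := PySem.List.min?_isMin hm' m (hperm.mem_iff.mpr (by simp))
  have h2 : m ≤ m' := by
    rcases List.mem_cons.mp (hperm.mem_iff.mp (PySem.List.min?_mem hm')) with rfl | hmt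
    · omega
    · exact (List.pairwise_cons.mp hpw).1 m' hmt
  rw [hm']
  congr 1
  omega

-- A pops the first occurrence of the minimum m: value m, remainder a permutation of the tail
lemma pop_min (sc : List Int) (m : Int) (t : List Int) (hperm : sc.Perm (m :: t))
    (hmin : PySem.List.min? sc (fun x => x) = some m) :
    ∃ i sc1, PySem.List.index? sc m = some i ∧
      PySem.List.pop? sc (i : Int) = some (m, sc1) ∧ sc1.Perm t := by
  have hmem : m ∈ sc := PySem.List.min?_mem hmin
  obtain ⟨i, hi⟩ : ∃ i, PySem.List.index? sc m = some i := by
    cases h : PySem.List.index? sc m with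
    | none => exact absurd ((PySem.List.index?_eq_none_iff _ _).mp h) (not_not_intro hmem)
    | some i => exact ⟨i, rfl⟩
  obtain ⟨pre, suf, hsc, hlen, -⟩ := (PySem.List.index?_eq_some_iff _ _ _).mp hi
  refine ⟨i, pre ++ suf, hi, ?_, ?_⟩
  · have hilt : i < sc.length := by subst hsc; simp; omega
    subst hsc hlen
    have he : (pre ++ m :: suf).eraseIdx pre.length = pre ++ suf := by
      rw [List.eraseIdx_append_of_length_le (Nat.le_refl pre.length)]; simp
    rw [PySem.List.pop?_natCast _ _ hilt, he]
    simp [List.getElem_append_right (Nat.le_refl pre.length)]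
  · have h1 : sc.Perm (m :: (pre ++ suf)) := by
      subst hsc; exact List.perm_middle
    exact (h1.symm.trans hperm).cons_inv

-- main invariant: A's loop on sc equals B's loop on any sorted permutation of sc, same fuel
lemma loop_eq (n : Nat) : ∀ (sc s : List Int) (K ans : Int), sc ≠ [] →
    sc.length ≤ n + 1 → sc.Perm s → s.Pairwise (· ≤ ·) →
    solutionLoop n sc K ans = altLoop n s K ans := by
  induction n with
  | zero =>
    intro sc s K ans hne hlen hperm hpw
    match sc, hne with
    | x :: t, _ =>
      have ht : t = [] := by simpa using hlen
      subst ht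
      have hs : s = [x] := hperm.symm.eq_singleton
      subst hs
      simp only [solutionLoop, altLoop, solutionFin, altFin, PySem.List.pyGet?,
        PySem.List.pyIdx?]
      norm_num
      split_ifs <;> omega
  | succ n ih =>
    intro sc s K ans hne hlen hperm hpw
    by_cases hl : 1 < sc.length
    · have hslen : 1 < s.length := by rw [← hperm.length_eq]; exact hl
      match s, hslen with
      | m :: m2 :: rest, _ =>
        have hmin : PySem.List.min? sc (fun x => x) = some m :=
          min_sorted_perm sc m (m2 :: rest) hperm hpw
        by_cases hK : m < K
        · -- combine branch on both sides
          obtain ⟨i, sc1, hi, hpop1, hperm1⟩ := pop_min sc m (m2 :: rest) hperm hmin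
          have hpw1 : (m2 :: rest).Pairwise (· ≤ ·) := (List.pairwise_cons.mp hpw).2
          have hmin1 : PySem.List.min? sc1 (fun x => x) = some m2 :=
            min_sorted_perm sc1 m2 rest hperm1 hpw1
          obtain ⟨j, sc2, hj, hpop2, hperm2⟩ := pop_min sc1 m2 rest hperm1 hmin1
          have hAstep : solutionLoop (n + 1) sc K ans =
              solutionLoop n (sc2 ++ [m + m2 * 2]) K (ans + 1) := by
            simp only [solutionLoop, if_pos hl, hmin, if_pos hK, hi, hpop1, hmin1, hj, hpop2]
          have hBguard : 1 < (m :: m2 :: rest).length ∧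
              PySem.List.pyGetD (m :: m2 :: rest) 0 0 < K := by
            refine ⟨by simp, ?_⟩
            rw [PySem.List.pyGetD_zero_cons]; exact hK
          have hget1 : PySem.List.pyGetD (m :: m2 :: rest) 1 0 = m2 := by
            have h1 : ((1 : Nat) : Int) = (1 : Int) := by norm_num
            rw [← h1, PySem.List.pyGetD_natCast]; rfl
          have hslice : PySem.List.slice (m :: m2 :: rest) (some 2) none = rest := by
            rw [PySem.List.slice_from _ (by norm_num)]; rfl
          have hBstep : altLoop (n + 1) (m :: m2 :: rest) K ans =
              altLoop n (insertSorted rest (m + m2 * 2)) K (ans + 1) := by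
            simp only [altLoop, hget1, hslice, PySem.List.pyGetD_zero_cons]
            rw [if_pos ⟨by simp, hK⟩]
          rw [hAstep, hBstep]
          have hlen1 : sc1.length + 1 = sc.length :=
            PySem.List.length_of_pop?_eq_some sc hpop1
          have hlen2 : sc2.length + 1 = sc1.length :=
            PySem.List.length_of_pop?_eq_some sc1 hpop2
          apply ih
          · simp
          · simp; omega
          · refine ((hperm2.append_right [m + m2 * 2]).trans ?_).trans
              (insertSorted_perm rest (m + m2 * 2)).symm
            exact List.perm_append_comm
          · exact insertSorted_pairwise rest _ (List.pairwise_cons.mp hpw1).2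
        · -- min ≥ K: A pops down and returns ans; B's guard fails and returns ans
          have hge : ∀ y ∈ sc, K ≤ y := by
            intro y hy
            have := PySem.List.min?_isMin hmin y hy
            simp at this; omega
          have hA : solutionLoop (n + 1) sc K ans = ans :=
            solutionLoop_ge (n + 1) sc K ans hne hge
          have hBguard : ¬ (1 < (m :: m2 :: rest).length ∧
              PySem.List.pyGetD (m :: m2 :: rest) 0 0 < K) := by
            rw [PySem.List.pyGetD_zero_cons]; intro h; exact hK h.2
          have hg : PySem.List.pyGet? (m :: m2 :: rest) 0 = some m := by
            simp [PySem.List.pyGet?, PySem.List.pyIdx?]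
            rw [if_pos (by omega)]
            simp
          have hKm : K ≤ m := by omega
          rw [hA, altLoop, if_neg hBguard, altFin, hg]
          simp [hKm]
    · match sc, hne with
      | x :: t, _ =>
        have ht : t = [] := by
          simp at hl
          cases t with
          | nil => rfl
          | cons a u => simp at hl
        subst ht
        have hs : s = [x] := hperm.symm.eq_singleton
        subst hs
        simp only [solutionLoop, altLoop, solutionFin, altFin, PySem.List.pyGet?,
          PySem.List.pyIdx?]
        norm_num
        split_ifs <;> omega

-- ===== VERDICT (by name: the statement is the Claim_ definition above) =====
theorem solution_spec : Claim_equal_solution := by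
  intro scoville K _ hpre
  unfold Spec_solution solution solution_alt
  have hperm : scoville.Perm (PySem.List.sorted scoville (fun x => x) false) :=
    (PySem.List.sorted_perm scoville (fun x => x) false).symm
  rw [hperm.symm.length_eq]
  have hn1 : 1 ≤ scoville.length := by
    cases scoville with
    | nil => exact absurd rfl hpre
    | cons a t => simp
  exact loop_eq scoville.length scoville (PySem.List.sorted scoville (fun x => x) false)
    K 0 hpre (by omega) hperm (PySem.List.sorted_pairwise scoville (fun x => x))
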